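-- pv_equiv track=rewrite | github.com/umutakpinar/horspoolalgorithm | main.py | black_match_table
-- ===== SOURCE A (Python) =====
-- def black_match_table(
--         searchPattern="TOOTH"):  # aranacak kelime bu şekilde parametre olarak verilmeli değer verilmezse TOOOTH
--     pattern = list(searchPattern)
--     length = len(pattern)  # patternin boyutunu aldık
--     skip = [i for i in
--             range(256)]  # ASCII tablsoundaki karakterlerin hepsi geçerli olsun diye 256 elemanlı bir dizi oluşturduk
--     for i in skip:  # bu bizim black_match_table'ımız buradaki her bir elemanı pattern boyutuna eşitledik.
--         skip[i] = length
--     for i in pattern: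
--         if i != pattern[len(pattern) - 1]:  # patternin son elemanı hariç hepsinin değerlerini hesapladık (III. kural)
--             skip[ord(i)] = length - pattern.index(
--                 i) - 1  # 256 karakterli dizi oluşturduğumuz için ASCII'ye dönüştürdük ord() metodu ile her birinin value'larını hesaplayıp skip tablosundaki ilgili indexlere gönderdik
--     return skip  # skipi geri döndürdük bu bizim black_match_table değerimiz
-- ===== SOURCE B (Python) =====
-- def black_match_table(searchPattern="TOOTH"):
--     n = len(searchPattern)
--     last = searchPattern[-1] if n else None
--     table = []
--     for k in range(256):
--         c = chr(k)
--         j = -1 if c == last else searchPattern.find(c)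
--         table.append(n if j < 0 else n - j - 1)
--     return table
-- ===== Notes on version B (the rewrite author's own statement) =====
-- stated objective: faster
-- what changed: B never mutates a table or walks the pattern per character: it traverses the 256 ASCII codes and computes each slot directly with one str.find per code (first occurrence, skipping the last character), instead of A's 256-step self-indexing init loop plus a pass over the pattern with a repeated pattern.index inner scan.
import Mathlib
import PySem

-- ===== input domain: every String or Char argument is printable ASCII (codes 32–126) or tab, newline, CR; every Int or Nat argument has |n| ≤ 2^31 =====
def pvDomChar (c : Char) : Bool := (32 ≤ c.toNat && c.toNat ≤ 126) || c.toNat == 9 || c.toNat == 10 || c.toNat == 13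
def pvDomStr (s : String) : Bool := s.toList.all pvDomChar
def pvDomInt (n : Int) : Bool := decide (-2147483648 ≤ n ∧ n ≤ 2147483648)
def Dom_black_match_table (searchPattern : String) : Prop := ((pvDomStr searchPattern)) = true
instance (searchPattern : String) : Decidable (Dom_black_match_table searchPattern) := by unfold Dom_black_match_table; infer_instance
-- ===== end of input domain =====

-- B builds the 256-entry table directly, one slot per ASCII code via str.find, instead of
-- A's mutate-in-place passes over the pattern with a repeated pattern.index scan (faster: A is O(m^2)).

-- ===== PORT A =====
def black_match_table (searchPattern : String) : List Int :=
  let pattern := searchPattern.toList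
  let length : Int := pattern.length
  -- skip = [i for i in range(256)]
  let skip := PySem.List.pyRange 0 256 1
  -- for i in skip: skip[i] = length — Python iterates by position, reads the CURRENT element
  -- as i, then assigns skip[i] = length (indices here are always in range).
  let skip := (List.range 256).foldl
      (fun sk pos =>
        let i := sk.getD pos 0
        PySem.List.pySetD sk i length) skip
  -- for i in pattern: if i != pattern[len(pattern)-1]: skip[ord(i)] = length - pattern.index(i) - 1
  -- (pattern.index(i) always succeeds since i ∈ pattern, so the .getD 0 default is never used)
  pattern.foldl
    (fun sk c =>
      if PySem.List.pyGet? pattern ((pattern.length : Int) - 1) ≠ some c then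
        PySem.List.pySetD sk ((c.toNat : Int))
          (length - (((PySem.List.index? pattern c).getD 0 : Nat) : Int) - 1)
      else sk) skip

-- ===== PORT B =====
def black_match_table_alt (searchPattern : String) : List Int :=
  let n : Int := searchPattern.toList.length
  -- last = searchPattern[-1] if n else None
  let last? : Option Char := searchPattern.toList.getLast?
  -- for k in range(256): c = chr(k); j = -1 if c == last else searchPattern.find(c); table.append(...)
  (List.range 256).foldl
    (fun table k =>
      let c := Char.ofNat k
      let j : Int := if some c = last? then -1 else PySem.Str.find searchPattern (String.ofList [c])
      table ++ [if j < 0 then n else n - j - 1]) []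

-- ===== PRECONDITION & SPEC =====
def Spec_black_match_table (searchPattern : String) (out : List Int) : Prop := out = black_match_table_alt searchPattern
instance (searchPattern : String) (out : List Int) : Decidable (Spec_black_match_table searchPattern out) := by unfold Spec_black_match_table; infer_instance

-- ===== CLAIM (what is proved, stated in full; the proofs are below) =====
def Claim_equal_black_match_table : Prop := ∀ (searchPattern : String), Dom_black_match_table searchPattern → Spec_black_match_table searchPattern (black_match_table searchPattern)

-- ===== LEMMAS AND PROOFS =====

-- A's first loop (over the initial [0..255], overwriting each slot) is [n]*256.
theorem pv_init_prefix (n : Int) (k : Nat) (hk : k ≤ 256) :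
    (List.range k).foldl
      (fun sk pos => PySem.List.pySetD sk (sk.getD pos 0) n)
      (PySem.List.pyRange 0 256 1)
    = List.replicate k n ++ PySem.List.pyRange k 256 1 := by
  induction k with
  | zero => simp
  | succ k ih =>
    have hk' : (k : Int) < 256 := by exact_mod_cast Nat.lt_of_succ_le hk
    rw [List.range_succ, List.foldl_append, ih (by omega)]
    simp only [List.foldl_cons, List.foldl_nil]
    rw [PySem.List.pyRange_one_cons hk']
    have hget : (List.replicate k n ++ (k : Int) :: PySem.List.pyRange ((k : Int) + 1) 256 1).getD k 0
        = (k : Int) := by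
      rw [List.getD_eq_getElem?_getD, List.getElem?_append_right (by simp)]
      simp
    rw [hget, PySem.List.pySetD_natCast]
    rw [List.set_append_right _ _ (by simp)]
    simp [List.replicate_succ' (n := k)]

theorem pv_init (n : Int) :
    (List.range 256).foldl
      (fun sk pos => PySem.List.pySetD sk (sk.getD pos 0) n)
      (PySem.List.pyRange 0 256 1)
    = List.replicate 256 n := by
  have h := pv_init_prefix n 256 (le_refl _)
  rw [show ((256 : Nat) : Int) = 256 from by norm_num,
      PySem.List.pyRange_one_eq_nil (le_refl _), List.append_nil] at h
  exact h

-- Char.toNat is injective (distinct characters occupy distinct table slots)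
theorem pv_toNat_inj {c₁ c₂ : Char} (h : c₁.toNat = c₂.toNat) : c₁ = c₂ := by
  apply Char.ext
  exact UInt32.toNat_inj.mp h

theorem pv_ofNat_toNat (k : Nat) (hk : k < 256) : (Char.ofNat k).toNat = k := by
  rw [Char.toNat_ofNat, if_pos (Or.inl (by omega))]

-- a one-character prefix of a drop is exactly an indexed element
theorem pv_singleton_prefix (l : List Char) (c : Char) (i : Nat) :
    [c] <+: l.drop i ↔ l[i]? = some c := by
  rw [← List.head?_drop]
  constructor
  · rintro ⟨r, hr⟩; rw [← hr]; rfl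
  · intro h
    cases hd : l.drop i with
    | nil => rw [hd] at h; simp at h
    | cons a t =>
      rw [hd] at h; simp at h
      exact ⟨t, by simp [h]⟩

-- str.find of a single character is the first index of that character (or -1)
theorem pv_find_singleton (l : List Char) (c : Char) :
    PySem.Chars.find l [c]
      = match PySem.List.index? l c with
        | none => -1
        | some j => (j : Int) := by
  cases h : PySem.List.index? l c with
  | none =>
    have hnm : c ∉ l := (PySem.List.index?_eq_none_iff l c).mp h
    have : ¬ [c] <:+: l := by
      intro hin
      exact hnm (by simpa using hin.mem (List.mem_singleton_self c))
    exact (PySem.Chars.find_eq_neg_one_iff l [c]).mpr this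
  | some j =>
    obtain ⟨hj, hc, hmin⟩ := PySem.List.getElem_of_index?_eq_some h
    have hmemj : [c] <+: l.drop j := (pv_singleton_prefix l c j).mpr (by simp [List.getElem?_eq_getElem hj, hc])
    have hpos : 0 ≤ PySem.Chars.find l [c] := by
      rw [PySem.Chars.find_nonneg_iff]
      exact hmemj.isInfix.trans (List.drop_suffix j l).isInfix
    obtain ⟨hpre, hminf⟩ := PySem.Chars.find_spec hpos
    have hfj : (PySem.Chars.find l [c]).toNat = j := by
      rcases Nat.lt_trichotomy (PySem.Chars.find l [c]).toNat j with hlt | heq | hgt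
      · have := (pv_singleton_prefix l c _).mp hpre
        have hlt' : (PySem.Chars.find l [c]).toNat < l.length := lt_trans hlt hj
        rw [List.getElem?_eq_getElem hlt'] at this
        exact absurd (Option.some.injEq _ _ ▸ by simpa using this) (hmin _ hlt)
      · exact heq
      · exact absurd hmemj (hminf j hgt)
    show PySem.Chars.find l [c] = (j : Int)
    omega

-- fold-append over a list is map
theorem pv_foldl_append_map {α β : Type} (f : α → β) (l : List α) (acc : List β) :
    l.foldl (fun t k => t ++ [f k]) acc = acc ++ l.map f := by
  induction l generalizing acc with
  | nil => simp
  | cons a l ih => simp [ih]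

-- pointwise characterisation of A's second loop
theorem pv_foldA (P : List Char) (last : Char) :
    ∀ (suf : List Char) (sk : List Int), (∀ c ∈ suf, c ∈ P) → sk.length = 256 →
    ∀ k, k < 256 →
    (suf.foldl
      (fun sk c =>
        if ¬ last = c then
          PySem.List.pySetD sk ((c.toNat : Int))
            ((P.length : Int) - (((PySem.List.index? P c).getD 0 : Nat) : Int) - 1)
        else sk) sk)[k]?
    = if (Char.ofNat k) ∈ suf ∧ Char.ofNat k ≠ last
      then some ((P.length : Int) - (((PySem.List.index? P (Char.ofNat k)).getD 0 : Nat) : Int) - 1)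
      else sk[k]? := by
  intro suf
  induction suf with
  | nil => intro sk _ _ k hk; simp
  | cons c suf ih =>
    intro sk hsub hlen k hk
    have hlen' : (if ¬ last = c then
          PySem.List.pySetD sk ((c.toNat : Int))
            ((P.length : Int) - (((PySem.List.index? P c).getD 0 : Nat) : Int) - 1)
        else sk).length = 256 := by
      split
      · rw [PySem.List.pySetD_natCast]; simpa using hlen
      · exact hlen
    rw [List.foldl_cons, ih _ (fun c' h => hsub c' (List.mem_cons_of_mem _ h)) hlen' k hk]
    by_cases hin : Char.ofNat k ∈ suf ∧ Char.ofNat k ≠ last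
    · rw [if_pos hin, if_pos ⟨List.mem_cons_of_mem _ hin.1, hin.2⟩]
    · rw [if_neg hin]
      by_cases heq : c = Char.ofNat k
      · by_cases hlast : last = c
        · -- c is the last character: neither side writes
          rw [if_neg (by simp [hlast]),
              if_neg (by rintro ⟨_, hne⟩; exact hne (heq ▸ hlast.symm))]
        · -- first else-branch writes exactly slot k
          rw [if_pos hlast, if_pos ⟨heq ▸ List.mem_cons_self, fun h => hlast (heq ▸ h.symm)⟩]
          rw [PySem.List.pySetD_natCast, heq, pv_ofNat_toNat k hk]
          rw [List.getElem?_set_self (by omega)]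
      · -- c occupies a different slot (or no slot): sk[k]? unchanged
        have hcond : ¬ ((Char.ofNat k) ∈ c :: suf ∧ Char.ofNat k ≠ last) := by
          rintro ⟨hmem, hne⟩
          rcases List.mem_cons.mp hmem with h | h
          · exact heq h.symm
          · exact hin ⟨h, hne⟩
        rw [if_neg hcond]
        split
        · rw [PySem.List.pySetD_natCast]
          rw [List.getElem?_set_ne (fun h => heq (pv_toNat_inj (h.trans (pv_ofNat_toNat k hk).symm)))]
        · rfl

-- find on a one-character String.ofList literal, moved to the char-list level
theorem pv_find_str (s : String) (c : Char) :
    PySem.Str.find s (String.ofList [c]) = PySem.Chars.find s.toList [c] := by simp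

-- A's second loop preserves the table length
theorem pv_foldA_len (P : List Char) (last : Char) :
    ∀ (suf : List Char) (sk : List Int),
    (suf.foldl
      (fun sk c =>
        if ¬ last = c then
          PySem.List.pySetD sk ((c.toNat : Int))
            ((P.length : Int) - (((PySem.List.index? P c).getD 0 : Nat) : Int) - 1)
        else sk) sk).length = sk.length := by
  intro suf
  induction suf with
  | nil => intro sk; rfl
  | cons c suf ih =>
    intro sk
    rw [List.foldl_cons, ih]
    split
    · rw [PySem.List.pySetD_natCast]; simp
    · rfl

-- ===== VERDICT (by name: the statement is the Claim_ definition above) =====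
set_option maxRecDepth 8192 in
theorem black_match_table_spec : Claim_equal_black_match_table := by
  intro s hdomS
  have hdom : ∀ c ∈ s.toList, c.toNat < 256 := by
    intro c hc
    have h := List.all_eq_true.mp hdomS c hc
    unfold pvDomChar at h
    simp only [Bool.or_eq_true, Bool.and_eq_true, decide_eq_true_eq, beq_iff_eq] at h
    omega
  unfold Spec_black_match_table black_match_table black_match_table_alt
  simp only [pv_init, pv_foldl_append_map, List.nil_append, pv_find_str]
  generalize hg : s.toList = P
  rw [hg] at hdom
  cases P with
  | nil =>
    simp only [List.foldl_nil]
    apply List.ext_getElem?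
    intro k
    by_cases hk : k < 256
    · rw [List.getElem?_replicate_of_lt hk, List.getElem?_map, List.getElem?_range hk]
      have hfind : PySem.Chars.find ([] : List Char) [Char.ofNat k] = -1 := by
        apply (PySem.Chars.find_eq_neg_one_iff _ _).mpr
        intro hinf
        simpa using hinf.mem (List.mem_singleton_self _)
      simp [hfind]
    · rw [List.getElem?_eq_none (by simp; omega), List.getElem?_eq_none (by simp; omega)]
  | cons a as =>
    have hne : (a :: as) ≠ ([] : List Char) := List.cons_ne_nil a as
    have hget : PySem.List.pyGet? (a :: as) (((a :: as).length : Int) - 1)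
        = some ((a :: as).getLast hne) := by
      rw [PySem.List.pyGet?_of_nonneg _ (by simp)]
      have ht : (((a :: as).length : Int) - 1).toNat = (a :: as).length - 1 := by simp
      rw [ht, ← List.getLast?_eq_getElem?]
      exact List.getLast?_eq_some_getLast hne
    have hstep : (fun (sk : List Int) (c : Char) =>
          if PySem.List.pyGet? (a :: as) (((a :: as).length : Int) - 1) ≠ some c then
            PySem.List.pySetD sk ((c.toNat : Int))
              (((a :: as).length : Int) - (((PySem.List.index? (a :: as) c).getD 0 : Nat) : Int) - 1)
          else sk)
        = (fun (sk : List Int) (c : Char) =>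
          if ¬ (a :: as).getLast hne = c then
            PySem.List.pySetD sk ((c.toNat : Int))
              (((a :: as).length : Int) - (((PySem.List.index? (a :: as) c).getD 0 : Nat) : Int) - 1)
          else sk) := by
      funext sk c
      rw [hget]
      simp only [ne_eq, Option.some.injEq]
    rw [hstep]
    have hlast? : (a :: as).getLast? = some ((a :: as).getLast hne) :=
      List.getLast?_eq_some_getLast hne
    apply List.ext_getElem?
    intro k
    by_cases hk : k < 256
    · rw [pv_foldA (a :: as) ((a :: as).getLast hne) (a :: as)
            (List.replicate 256 ((a :: as).length : Int)) (fun c h => h) (by simp) k hk,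
          List.getElem?_map, List.getElem?_range hk]
      simp only [hlast?, Option.map_some]
      have hfind := pv_find_singleton (a :: as) (Char.ofNat k)
      by_cases hlk : Char.ofNat k = (a :: as).getLast hne
      · rw [if_neg (by rintro ⟨_, hcon⟩; exact hcon hlk)]
        rw [List.getElem?_replicate_of_lt hk]
        simp [hlk]
      · simp only [show (some (Char.ofNat k) = some ((a :: as).getLast hne)) = False from by
            simp [hlk], if_false]
        cases hidx : PySem.List.index? (a :: as) (Char.ofNat k) with
        | none =>
          have hnm : Char.ofNat k ∉ (a :: as) := (PySem.List.index?_eq_none_iff _ _).mp hidx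
          rw [if_neg (by rintro ⟨hcon, _⟩; exact hnm hcon)]
          rw [List.getElem?_replicate_of_lt hk]
          rw [hfind, hidx]
          norm_num
        | some j =>
          have hm : Char.ofNat k ∈ (a :: as) := by
            rw [← PySem.List.index?_isSome_iff, hidx]; rfl
          rw [if_pos ⟨hm, hlk⟩]
          rw [hfind, hidx]
          have hj : ¬ ((j : Int) < 0) := by omega
          simp [hj]
    · rw [List.getElem?_eq_none (by rw [pv_foldA_len]; simp; omega),
          List.getElem?_eq_none (by simp; omega)]
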